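-- pv_equiv track=rewrite | github.com/zzzlou/Self-Correction-Agent | rllm/agents/utils.py | get_recent_assistant_user_messages
-- ===== SOURCE A (Python) =====
-- def get_recent_assistant_user_messages(chat_completions_messages):
--     """
--     Extracts the most recent assistant message and environment messages (user/tool) from a chat completions list.
--
--     Args:
--         chat_completions_messages (List[Dict]): List of message dictionaries from chat completions.
--
--     Returns:
--         Tuple[Dict, List[Dict]]: A tuple containing:
--             - The most recent assistant message (or None if not found)
--             - A list of environment messages (user/tool) that occurred after the last assistant message,
--               in chronological order.
--     """
--     # Loop backwards to get the last assistant message and environment messages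
--     env_messages = []
--     assistant_message = None
--     seen_assistant_message = False
--     for message in reversed(chat_completions_messages):
--         role = message.get("role", None)
--         if role == "assistant":
--             if assistant_message:
--                 break
--             seen_assistant_message = True
--             assistant_message = message
--         elif role in ["user", "tool"] and not seen_assistant_message:
--             env_messages.append(message)
--     # Reverse the env_messages to maintain chronological order
--     env_messages = list(reversed(env_messages))
--
--     return assistant_message, env_messages
-- ===== SOURCE B (Python) =====
-- def get_recent_assistant_user_messages(chat_completions_messages):
--     # Two-pass: find the index of the LAST assistant message, then filter the suffix.
--     idx = -1
--     for i, message in enumerate(chat_completions_messages):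
--         if message.get("role") == "assistant":
--             idx = i
--     assistant_message = chat_completions_messages[idx] if idx >= 0 else None
--     env_messages = [m for m in chat_completions_messages[idx + 1:]
--                     if m.get("role") in ("user", "tool")]
--     return assistant_message, env_messages
-- ===== Notes on version B (the rewrite author's own statement) =====
-- stated objective: simpler
-- what changed: Replaces the backward scan with break/flag state by a two-pass decomposition: a forward scan records the index of the last assistant message, then the suffix after it is filtered for user/tool roles, yielding chronological order without any reversing.
import Mathlib
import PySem

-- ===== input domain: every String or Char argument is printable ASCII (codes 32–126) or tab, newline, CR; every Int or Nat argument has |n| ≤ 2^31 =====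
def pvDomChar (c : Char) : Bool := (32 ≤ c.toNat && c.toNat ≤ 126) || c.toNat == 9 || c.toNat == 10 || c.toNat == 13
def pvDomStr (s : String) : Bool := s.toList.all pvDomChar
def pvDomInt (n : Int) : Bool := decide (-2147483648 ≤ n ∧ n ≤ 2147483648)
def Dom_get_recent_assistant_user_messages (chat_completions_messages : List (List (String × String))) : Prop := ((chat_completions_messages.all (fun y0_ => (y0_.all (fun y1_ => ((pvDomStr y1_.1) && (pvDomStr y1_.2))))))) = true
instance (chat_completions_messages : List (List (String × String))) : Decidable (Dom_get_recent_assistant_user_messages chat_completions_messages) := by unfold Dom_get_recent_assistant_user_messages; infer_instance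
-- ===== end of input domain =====

-- B replaces A's backward scan with flags by: find the last assistant index, then filter the suffix (same values, simpler).

-- message.get("role", None): first-match lookup on the association list (Python dict)
def pvRole (m : List (String × String)) : Option String := (PySem.Dict.mk m).get? "role"

def pvIsAssistant (m : List (String × String)) : Bool := pvRole m == some "assistant"

-- role in ["user", "tool"]
def pvIsEnv (m : List (String × String)) : Bool := pvRole m == some "user" || pvRole m == some "tool"

-- ===== PORT A =====
-- Python truthiness of the Optional[dict] assistant_message
def pvTruthy (o : Option (List (String × String))) : Bool :=
  match o with
  | some l => !l.isEmpty
  | none => false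

-- the 'for message in reversed(...)' loop with its break; state = (env_messages, assistant_message, seen_assistant_message)
def pvLoopA : List (List (String × String)) → List (List (String × String)) →
    Option (List (String × String)) → Bool →
    (List (List (String × String)) × Option (List (String × String)))
  | [], env, am, _ => (env, am)
  | m :: rest, env, am, seen =>
    if pvIsAssistant m then
      if pvTruthy am then (env, am)      -- break
      else pvLoopA rest env (some m) true
    else if pvIsEnv m && !seen then
      pvLoopA rest (env ++ [m]) am seen
    else pvLoopA rest env am seen

def get_recent_assistant_user_messages (chat_completions_messages : List (List (String × String))) : (Option (List (String × String))) × (List (List (String × String))) :=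
  let r := pvLoopA chat_completions_messages.reverse [] none false
  (r.2, r.1.reverse)

-- ===== PORT B =====
def get_recent_assistant_user_messages_alt (chat_completions_messages : List (List (String × String))) : (Option (List (String × String))) × (List (List (String × String))) :=
  let idx : Int := (PySem.List.enumerate chat_completions_messages 0).foldl
    (fun acc p => if pvIsAssistant p.2 then p.1 else acc) (-1)
  let assistant_message : Option (List (String × String)) :=
    if 0 ≤ idx then PySem.List.pyGet? chat_completions_messages idx else none
  let env_messages :=
    (PySem.List.slice chat_completions_messages (some (idx + 1)) none).filter pvIsEnv
  (assistant_message, env_messages)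

-- ===== PRECONDITION & SPEC =====
def Spec_get_recent_assistant_user_messages (chat_completions_messages : List (List (String × String))) (out : (Option (List (String × String))) × (List (List (String × String)))) : Prop := out = get_recent_assistant_user_messages_alt chat_completions_messages
instance (chat_completions_messages : List (List (String × String))) (out : (Option (List (String × String))) × (List (List (String × String)))) : Decidable (Spec_get_recent_assistant_user_messages chat_completions_messages out) := by unfold Spec_get_recent_assistant_user_messages; infer_instance

-- ===== CLAIM (what is proved, stated in full; the proofs are below) =====
def Claim_equal_get_recent_assistant_user_messages : Prop := ∀ (chat_completions_messages : List (List (String × String))), Dom_get_recent_assistant_user_messages chat_completions_messages → Spec_get_recent_assistant_user_messages chat_completions_messages (get_recent_assistant_user_messages chat_completions_messages)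

-- ===== LEMMAS AND PROOFS =====

-- a message whose role lookup succeeds is a nonempty dict, hence truthy
theorem pvTruthy_of_isAssistant (a : List (String × String)) (h : pvIsAssistant a = true) :
    pvTruthy (some a) = true := by
  cases a with
  | nil => exact absurd h (by decide)
  | cons x xs => simp [pvTruthy]

-- phase 2: once an assistant message is held and seen=true, the loop changes nothing
theorem pvLoopA_phase2 (l env : List (List (String × String))) (a : List (String × String))
    (ha : pvIsAssistant a = true) : pvLoopA l env (some a) true = (env, some a) := by
  induction l with
  | nil => rfl
  | cons m rest ih =>
    simp only [pvLoopA, pvTruthy_of_isAssistant a ha]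
    by_cases hm : pvIsAssistant m = true <;> simp [hm, ih]

-- phase 1: a prefix with no assistant only appends its user/tool messages to env
theorem pvLoopA_phase1 (l : List (List (String × String)))
    (h : ∀ m ∈ l, pvIsAssistant m = false) (rest env : List (List (String × String))) :
    pvLoopA (l ++ rest) env none false = pvLoopA rest (env ++ l.filter pvIsEnv) none false := by
  induction l generalizing env with
  | nil => simp
  | cons m l' ih =>
    have hm : pvIsAssistant m = false := h m (by simp)
    have h' : ∀ x ∈ l', pvIsAssistant x = false := fun x hx => h x (by simp [hx])
    by_cases he : pvIsEnv m = true <;>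
      simp [pvLoopA, hm, he, ih h', List.append_assoc]

-- B's fold ignores a segment with no assistant
theorem pvFoldB_no_assistant (l : List (List (String × String)))
    (h : ∀ m ∈ l, pvIsAssistant m = false) (s acc : Int) :
    (PySem.List.enumerate l s).foldl (fun acc p => if pvIsAssistant p.2 then p.1 else acc) acc = acc := by
  induction l generalizing s acc with
  | nil => rfl
  | cons m l' ih =>
    have hm : pvIsAssistant m = false := h m (by simp)
    have h' : ∀ x ∈ l', pvIsAssistant x = false := fun x hx => h x (by simp [hx])
    simp [PySem.List.enumerate_cons, List.foldl_cons, hm, ih h']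

-- every list either has no assistant message, or splits at its LAST assistant message
theorem pv_split (msgs : List (List (String × String))) :
    (∀ m ∈ msgs, pvIsAssistant m = false) ∨
    ∃ pre a suf, msgs = pre ++ a :: suf ∧ pvIsAssistant a = true ∧
      ∀ m ∈ suf, pvIsAssistant m = false := by
  induction msgs with
  | nil => exact Or.inl (by simp)
  | cons m rest ih =>
    rcases ih with hno | ⟨pre, a, suf, heq, ha, hsuf⟩
    · by_cases hm : pvIsAssistant m = true
      · exact Or.inr ⟨[], m, rest, by simp, hm, hno⟩
      · exact Or.inl (by simpa [hm] using hno)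
    · exact Or.inr ⟨m :: pre, a, suf, by simp [heq], ha, hsuf⟩

-- ===== VERDICT (by name: the statement is the Claim_ definition above) =====
theorem get_recent_assistant_user_messages_spec : Claim_equal_get_recent_assistant_user_messages := by
  intro msgs _hdom
  unfold Spec_get_recent_assistant_user_messages
  unfold get_recent_assistant_user_messages get_recent_assistant_user_messages_alt
  rcases pv_split msgs with hno | ⟨pre, a, suf, heq, ha, hsuf⟩
  · -- no assistant message at all
    have hrev : ∀ m ∈ msgs.reverse, pvIsAssistant m = false := by
      intro m hm; exact hno m (List.mem_reverse.mp hm)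
    have hA : pvLoopA (msgs.reverse ++ []) [] none false
        = pvLoopA [] ([] ++ msgs.reverse.filter pvIsEnv) none false :=
      pvLoopA_phase1 msgs.reverse hrev [] []
    simp only [List.append_nil, List.nil_append] at hA
    have hidx := pvFoldB_no_assistant msgs hno 0 (-1)
    simp [hA, pvLoopA, hidx, List.filter_reverse, PySem.List.slice_zero_start,
      PySem.List.slice_none_none]
  · -- msgs = pre ++ a :: suf, a is the last assistant message
    subst heq
    -- A side
    have hrevsuf : ∀ m ∈ suf.reverse, pvIsAssistant m = false := by
      intro m hm; exact hsuf m (List.mem_reverse.mp hm)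
    have hA1 : pvLoopA (suf.reverse ++ (a :: pre.reverse)) [] none false
        = pvLoopA (a :: pre.reverse) ([] ++ suf.reverse.filter pvIsEnv) none false :=
      pvLoopA_phase1 suf.reverse hrevsuf (a :: pre.reverse) []
    have hA2 : pvLoopA (a :: pre.reverse) (suf.reverse.filter pvIsEnv) none false
        = (suf.reverse.filter pvIsEnv, some a) := by
      simp [pvLoopA, ha, pvTruthy, pvLoopA_phase2 pre.reverse _ a ha]
    -- B side: the fold finds index pre.length
    have hidx : (PySem.List.enumerate (pre ++ a :: suf) 0).foldl
        (fun acc p => if pvIsAssistant p.2 then p.1 else acc) (-1) = (pre.length : Int) := by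
      rw [PySem.List.enumerate_append, List.foldl_append, PySem.List.enumerate_cons,
        List.foldl_cons]
      simp [ha, pvFoldB_no_assistant suf hsuf]
    have hget : PySem.List.pyGet? (pre ++ a :: suf) (pre.length : Int) = some a :=
      PySem.List.pyGet?_append_length pre suf a
    have hslice : PySem.List.slice (pre ++ a :: suf) (some ((pre.length : Int) + 1)) none = suf := by
      have h1 : ((pre.length : Int) + 1) = ((pre.length + 1 : Nat) : Int) := by push_cast; ring
      rw [h1, PySem.List.slice_from_natCast,
        show pre ++ a :: suf = (pre ++ [a]) ++ suf by simp,
        show pre.length + 1 = (pre ++ [a]).length by simp, List.drop_left]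
    have hA : pvLoopA (suf.reverse ++ (a :: pre.reverse)) [] none false
        = (suf.reverse.filter pvIsEnv, some a) := by
      rw [hA1]
      simp only [List.nil_append]
      exact hA2
    simp only [hidx, hget, hslice]
    simp [hA, List.filter_reverse]
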